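-- pv_equiv track=rewrite | github.com/hjoo830/Algorithms | 프로그래머스/0/120837. 개미 군단/개미 군단.py | solution
-- ===== SOURCE A (Python) =====
-- def solution(hp):
--     answer = 0
--     while hp>=5:
--         answer+=(hp//5)
--         hp%=5
--     if hp>=3:
--         answer+=1
--         hp-=3
--     if hp>0:
--         answer+=hp
--         hp-=1
--     return answer
-- ===== SOURCE B (Python) =====
-- def solution(hp):
--     # Minimal ants: 5 hp each until <5 remain; the cost of each residue 0..4
--     # (using the 3- and 1-hp ants) is precomputed in a lookup table.
--     if hp <= 0:
--         return 0
--     return hp // 5 + (0, 1, 2, 1, 2)[hp % 5]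
-- ===== Notes on version B (the rewrite author's own statement) =====
-- stated objective: simpler
-- what changed: Replaces A's while loop and the two greedy conditional branches (subtracting 3 then counting 1s) with a single arithmetic expression: hp//5 plus a precomputed residue-cost table (0,1,2,1,2) indexed by hp%5, guarded by hp<=0.
import Mathlib
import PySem

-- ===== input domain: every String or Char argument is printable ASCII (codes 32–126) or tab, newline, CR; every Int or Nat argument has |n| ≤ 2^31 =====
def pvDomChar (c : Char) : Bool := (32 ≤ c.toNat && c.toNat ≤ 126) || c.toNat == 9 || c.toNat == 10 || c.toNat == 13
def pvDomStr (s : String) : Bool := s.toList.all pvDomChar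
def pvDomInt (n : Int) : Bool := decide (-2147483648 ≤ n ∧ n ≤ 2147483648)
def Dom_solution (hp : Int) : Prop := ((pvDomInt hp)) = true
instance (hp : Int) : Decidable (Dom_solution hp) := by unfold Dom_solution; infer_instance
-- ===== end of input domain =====

-- B replaces A's while loop and greedy branches by hp//5 plus a precomputed
-- residue-cost table indexed by hp%5 (objective: simpler).

-- ===== PORT A =====
-- the while loop: state (answer, hp); fuel only makes the recursion structural
-- (hp strictly decreases each iteration, so hp.toNat + 1 steps always suffice)
def solutionLoop (fuel : Nat) (answer hp : Int) : Int × Int :=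
  match fuel with
  | 0 => (answer, hp)
  | n + 1 =>
    if hp ≥ 5 then
      solutionLoop n (answer + PySem.Int.floordiv hp 5) (PySem.Int.mod hp 5)
    else (answer, hp)

def solution (hp : Int) : Int :=
  let p := solutionLoop (hp.toNat + 1) 0 hp
  let answer := p.1
  let hp := p.2
  let q : Int × Int := if hp ≥ 3 then (answer + 1, hp - 3) else (answer, hp)
  if q.2 > 0 then q.1 + q.2 else q.1

-- ===== PORT B =====
-- the tuple (0, 1, 2, 1, 2) becomes a list; the index hp % 5 always lies in
-- 0..4 when hp > 0, so Python's tuple indexing never raises (default unused)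
def solution_alt (hp : Int) : Int :=
  if hp ≤ 0 then 0
  else PySem.Int.floordiv hp 5 +
       PySem.List.pyGetD ([0, 1, 2, 1, 2] : List Int) (PySem.Int.mod hp 5) 0

-- ===== PRECONDITION & SPEC =====
def Spec_solution (hp : Int) (out : Int) : Prop := out = solution_alt hp
instance (hp : Int) (out : Int) : Decidable (Spec_solution hp out) := by unfold Spec_solution; infer_instance

-- ===== CLAIM (what is proved, stated in full; the proofs are below) =====
def Claim_equal_solution : Prop := ∀ (hp : Int), Dom_solution hp → Spec_solution hp (solution hp)

-- ===== LEMMAS AND PROOFS =====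

theorem solutionLoop_big (n : Nat) (a hp : Int) (h : hp ≥ 5) :
    solutionLoop (n + 2) a hp = (a + PySem.Int.floordiv hp 5, PySem.Int.mod hp 5) := by
  have h5 : (0:Int) < 5 := by norm_num
  have hm := PySem.Int.mod_eq_emod_of_pos (a := hp) h5
  rw [solutionLoop, if_pos h, solutionLoop, if_neg (by omega)]

theorem solutionLoop_small (n : Nat) (a hp : Int) (h : ¬ hp ≥ 5) :
    solutionLoop (n + 1) a hp = (a, hp) := by
  rw [solutionLoop, if_neg h]

-- the residue table lookup, evaluated for each of the five possible residues
theorem table_eval (r : Int) (h1 : 0 ≤ r) (h2 : r < 5) :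
    PySem.List.pyGetD ([0, 1, 2, 1, 2] : List Int) r 0 =
      (if r ≥ 3 then 1 else 0) + (if r ≥ 3 then r - 3 else r) := by
  interval_cases r <;> decide

-- ===== VERDICT (by name: the statement is the Claim_ definition above) =====
theorem solution_spec : Claim_equal_solution := by
  intro hp _
  unfold Spec_solution solution solution_alt
  have h5 : (0:Int) < 5 := by norm_num
  by_cases h : hp ≥ 5
  · have hn : hp.toNat + 1 = (hp.toNat - 2) + 1 + 2 := by omega
    rw [hn, solutionLoop_big _ 0 hp h]
    have hm := PySem.Int.mod_eq_emod_of_pos (a := hp) h5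
    have hd := PySem.Int.floordiv_eq_ediv_of_pos (a := hp) h5
    have ht := table_eval (hp % 5) (Int.emod_nonneg _ (by norm_num)) (by omega)
    simp only [hm, hd] at *
    rw [ht]
    split_ifs <;> omega
  · rw [solutionLoop_small _ 0 hp h]
    by_cases h0 : hp ≤ 0
    · simp only []
      rw [if_pos h0]
      split_ifs <;> omega
    · have hm := PySem.Int.mod_eq_emod_of_pos (a := hp) h5
      have hd := PySem.Int.floordiv_eq_ediv_of_pos (a := hp) h5
      have hm5 : hp % 5 = hp := by omega
      have hd5 : hp / 5 = 0 := by omega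
      have ht := table_eval (hp % 5) (Int.emod_nonneg _ (by norm_num)) (by omega)
      simp only [hm, hd, hm5, hd5] at *
      rw [if_neg h0, ht]
      split_ifs <;> omega
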